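-- pv_equiv track=rewrite | github.com/Piyushrajsharm/Youtube-Automation | src/viralforge/voice_director.py | _emphasize_power_phrases
-- ===== SOURCE A (Python) =====
-- def _emphasize_power_phrases(text: str) -> str:
--     replacements = {
--         "not human": "not human.",
--         "A worker": "A worker.",
--         "The risk is access": "The risk is access.",
--         "the keys": "the keys.",
--     }
--     for phrase, replacement in replacements.items():
--         text = text.replace(phrase, replacement)
--     return text
-- ===== SOURCE B (Python) =====
-- _PHRASES = ("not human", "A worker", "The risk is access", "the keys")
--
--
-- def _emphasize_power_phrases(text: str) -> str:
--     # One left-to-right scan over the text, matching the phrase table once at each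
--     # position, instead of four sequential global .replace() passes.
--     out = []
--     i = 0
--     n = len(text)
--     while i < n:
--         for phrase in _PHRASES:
--             if text.startswith(phrase, i):
--                 out.append(phrase + ".")
--                 i += len(phrase)
--                 break
--         else:
--             out.append(text[i])
--             i += 1
--     return "".join(out)
-- ===== Notes on version B (the rewrite author's own statement) =====
-- stated objective: alternative
-- what changed: Replaces four sequential global str.replace passes (each rescanning the whole text) with a single left-to-right scan that consults the phrase table once per position and appends a period after each match.
import Mathlib
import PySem

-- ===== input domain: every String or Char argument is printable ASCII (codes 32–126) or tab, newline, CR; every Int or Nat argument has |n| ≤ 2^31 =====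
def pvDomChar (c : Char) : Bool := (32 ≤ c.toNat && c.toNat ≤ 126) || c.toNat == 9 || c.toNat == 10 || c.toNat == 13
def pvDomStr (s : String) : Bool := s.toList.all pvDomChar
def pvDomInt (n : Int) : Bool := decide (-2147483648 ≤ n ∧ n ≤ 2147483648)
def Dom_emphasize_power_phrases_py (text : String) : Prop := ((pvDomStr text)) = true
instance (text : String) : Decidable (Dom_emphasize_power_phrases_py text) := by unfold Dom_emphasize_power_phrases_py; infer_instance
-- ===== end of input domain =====

-- B replaces A's four sequential global str.replace passes by a single left-to-right
-- table-driven scan over the text (objective: alternative, same cost).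


-- ===== PORT A =====
-- the dict literal of A
def pvReplacements : PySem.Dict String String :=
  PySem.Dict.ofList
    [("not human", "not human."),
     ("A worker", "A worker."),
     ("The risk is access", "The risk is access."),
     ("the keys", "the keys.")]

-- for phrase, replacement in replacements.items(): text = text.replace(phrase, replacement)
def emphasize_power_phrases_py (text : String) : String :=
  pvReplacements.items.foldl (fun t pr => PySem.Str.replace t pr.1 pr.2) text

-- ===== PORT B =====
-- the phrase table of Source B
def pvPhrases : List (List Char) :=
  ["not human".toList, "A worker".toList, "The risk is access".toList, "the keys".toList]

-- Source B's while-loop: at each position try the phrase table (first match wins),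
-- emit the phrase followed by a period and jump over it, otherwise emit the character.  The
-- `p.isEmpty` branch is a termination guard only (no phrase of ps is empty when
-- ps = pvPhrases; the branch is never taken then).
def scanL (ps : List (List Char)) (l : List Char) : List Char :=
  match l with
  | [] => []
  | c :: t =>
    match ps.find? (fun p => p.isPrefixOf (c :: t)) with
    | some p =>
      if _hp : p.isEmpty then c :: scanL ps t
      else p ++ '.' :: scanL ps ((c :: t).drop p.length)
    | none => c :: scanL ps t
termination_by l.length
decreasing_by
  all_goals simp_all
  all_goals (cases p with
    | nil => simp_all
    | cons a b => simp)

def emphasize_power_phrases_py_alt (text : String) : String :=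
  String.ofList (scanL pvPhrases text.toList)

-- ===== PRECONDITION & SPEC =====
def Spec_emphasize_power_phrases_py (text : String) (out : String) : Prop := out = emphasize_power_phrases_py_alt text
instance (text : String) (out : String) : Decidable (Spec_emphasize_power_phrases_py text out) := by unfold Spec_emphasize_power_phrases_py; infer_instance

-- ===== CLAIM (what is proved, stated in full; the proofs are below) =====
def Claim_equal_emphasize_power_phrases_py : Prop := ∀ (text : String), Dom_emphasize_power_phrases_py text → Spec_emphasize_power_phrases_py text (emphasize_power_phrases_py text)

-- ===== LEMMAS AND PROOFS =====

-- leftmost non-overlapping replace, as a plain structural recursion (old ≠ [] intended)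
def repl (old new : List Char) (l : List Char) : List Char :=
  match l with
  | [] => []
  | c :: t =>
    if _h : old.isPrefixOf (c :: t) = true ∧ old ≠ [] then
      new ++ repl old new ((c :: t).drop old.length)
    else c :: repl old new t
termination_by l.length
decreasing_by
  · have hlen : 1 ≤ old.length := by
      cases old with
      | nil => exact absurd rfl _h.2
      | cons a b => simp
    simp
    omega
  · simp

-- step equations for repl
theorem repl_nil (old new : List Char) : repl old new [] = [] := by rw [repl]

theorem repl_cons_pos (old new : List Char) (c : Char) (t : List Char)
    (h : old.isPrefixOf (c :: t) = true) (h0 : old ≠ []) :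
    repl old new (c :: t) = new ++ repl old new ((c :: t).drop old.length) := by
  rw [repl]; rw [dif_pos ⟨h, h0⟩]

theorem repl_cons_neg (old new : List Char) (c : Char) (t : List Char)
    (h : ¬ old.isPrefixOf (c :: t) = true) :
    repl old new (c :: t) = c :: repl old new t := by
  rw [repl]; rw [dif_neg (by intro hc; exact h hc.1)]

-- step equations for scanL
theorem scanL_nil (ps : List (List Char)) : scanL ps [] = [] := by rw [scanL.eq_def]

theorem scanL_cons_pos (ps : List (List Char)) (c : Char) (t : List Char) (q : List Char)
    (hf : ps.find? (fun p => p.isPrefixOf (c :: t)) = some q) (hq : q ≠ []) :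
    scanL ps (c :: t) = q ++ '.' :: scanL ps ((c :: t).drop q.length) := by
  rw [scanL.eq_def]
  simp only [hf]
  rw [dif_neg (by simpa using hq)]

theorem scanL_cons_neg (ps : List (List Char)) (c : Char) (t : List Char)
    (hf : ps.find? (fun p => p.isPrefixOf (c :: t)) = none) :
    scanL ps (c :: t) = c :: scanL ps t := by
  rw [scanL.eq_def]
  simp only [hf]

theorem scanL_empty (l : List Char) : scanL [] l = l := by
  induction l with
  | nil => exact scanL_nil []
  | cons c t ih => rw [scanL_cons_neg [] c t rfl, ih]

-- PySem.Chars.replace.go computes repl (for a nonempty pattern)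
theorem go_eq_repl (old new : List Char) (h0 : old ≠ []) :
    ∀ (fuel : Nat) (l acc : List Char), l.length ≤ fuel →
      PySem.Chars.replace.go old new fuel l acc = acc.reverse ++ repl old new l := by
  intro fuel
  induction fuel with
  | zero =>
    intro l acc hl
    have : l = [] := List.eq_nil_of_length_eq_zero (Nat.le_zero.mp hl)
    subst this
    simp [PySem.Chars.replace.go, repl_nil]
  | succ n ih =>
    intro l acc hl
    cases l with
    | nil => simp [PySem.Chars.replace.go, repl_nil]
    | cons c t =>
      have hlen : 1 ≤ old.length := by
        cases old with
        | nil => exact absurd rfl h0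
        | cons a b => simp
      by_cases hpre : old.isPrefixOf (c :: t) = true
      · have hstep : PySem.Chars.replace.go old new (n + 1) (c :: t) acc =
            PySem.Chars.replace.go old new n ((c :: t).drop old.length) (new.reverse ++ acc) := by
          simp [PySem.Chars.replace.go, hpre]
        rw [hstep, ih _ _ (by simp at hl ⊢; omega), repl_cons_pos old new c t hpre h0]
        simp
      · have hstep : PySem.Chars.replace.go old new (n + 1) (c :: t) acc =
            PySem.Chars.replace.go old new n t (c :: acc) := by
          simp [PySem.Chars.replace.go, hpre]
        rw [hstep, ih _ _ (by simp at hl; omega), repl_cons_neg old new c t hpre]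
        simp

theorem replace_eq_repl (s old new : List Char) (h0 : old ≠ []) :
    PySem.Chars.replace s old new = repl old new s := by
  have : old.isEmpty = false := by simpa using h0
  rw [PySem.Chars.replace, this]
  simpa using go_eq_repl old new h0 s.length s [] (le_refl _)

-- a d-free prefix of u ++ d :: s is a prefix of u
theorem prefix_through_dot (d : Char) :
    ∀ (w u s : List Char), d ∉ w → w <+: u ++ d :: s → w <+: u := by
  intro w
  induction w with
  | nil => intro u s _ _; exact List.nil_prefix
  | cons a w' ih =>
    intro u s hd hpre
    cases u with
    | nil =>
      rw [List.nil_append, List.cons_prefix_cons] at hpre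
      exact absurd (hpre.1 ▸ List.mem_cons_self) hd
    | cons b u' =>
      rw [List.cons_append, List.cons_prefix_cons] at hpre
      exact List.cons_prefix_cons.mpr ⟨hpre.1,
        ih u' s (fun hm => hd (List.mem_cons_of_mem _ hm)) hpre.2⟩

-- a prefix of u ++ x is a prefix of u or an extension of u
theorem prefix_append_cases {w u x : List Char} (h : w <+: u ++ x) : w <+: u ∨ u <+: w :=
  List.prefix_or_prefix_of_prefix h (List.prefix_append u x)

-- find? on an appended pattern list
theorem find?_append_some {α : Type} (f : α → Bool) {l₁ l₂ : List α} {a : α}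
    (h : l₁.find? f = some a) : (l₁ ++ l₂).find? f = some a := by
  rw [List.find?_append, h]; rfl

theorem find?_append_none {α : Type} (f : α → Bool) {l₁ l₂ : List α}
    (h : l₁.find? f = none) : (l₁ ++ l₂).find? f = l₂.find? f := by
  rw [List.find?_append, h]; rfl

-- scanL inserts dots only after copied text: a dot-free prefix of the output is a prefix of the input
theorem scan_prefix_dotfree (S : List (List Char)) (hS : ∀ q ∈ S, q ≠ []) :
    ∀ (n : Nat) (l w : List Char), l.length ≤ n → '.' ∉ w → w <+: scanL S l → w <+: l := by
  intro n
  induction n with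
  | zero =>
    intro l w hl _ hpre
    have : l = [] := List.eq_nil_of_length_eq_zero (Nat.le_zero.mp hl)
    subst this
    rw [scanL_nil] at hpre
    exact hpre
  | succ n ih =>
    intro l w hl hd hpre
    cases l with
    | nil => rw [scanL_nil] at hpre; exact hpre
    | cons c t =>
      cases hf : S.find? (fun p => p.isPrefixOf (c :: t)) with
      | some q =>
        have hq : q ≠ [] := hS q (List.mem_of_find?_eq_some hf)
        have hqpre : q <+: c :: t :=
          List.isPrefixOf_iff_prefix.mp (by simpa using List.find?_some hf)
        rw [scanL_cons_pos S c t q hf hq] at hpre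
        exact (prefix_through_dot '.' w q _ hd hpre).trans hqpre
      | none =>
        rw [scanL_cons_neg S c t hf] at hpre
        cases w with
        | nil => exact List.nil_prefix
        | cons a w' =>
          rw [List.cons_prefix_cons] at hpre
          exact List.cons_prefix_cons.mpr ⟨hpre.1,
            ih t w' (by simpa using hl) (fun hm => hd (List.mem_cons_of_mem _ hm)) hpre.2⟩

-- repl passes untouched over a block u in which (and across whose end) the pattern cannot match
theorem repl_append (p r : List Char) :
    ∀ (u : List Char), (∀ i < u.length, ¬ p <+: u.drop i ∧ ¬ u.drop i <+: p) →
      ∀ x, repl p r (u ++ x) = u ++ repl p r x := by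
  intro u
  induction u with
  | nil => intro _ x; simp
  | cons b u' ih =>
    intro hu x
    have h0 := hu 0 (by simp)
    have hnp : ¬ p.isPrefixOf (b :: (u' ++ x)) = true := by
      intro hc
      rcases prefix_append_cases (u := b :: u') (x := x)
          (List.isPrefixOf_iff_prefix.mp hc) with h | h
      · exact h0.1 (by simpa using h)
      · exact h0.2 (by simpa using h)
    rw [show (b :: u') ++ x = b :: (u' ++ x) from rfl,
        repl_cons_neg p r b (u' ++ x) hnp,
        ih (fun i hi => by simpa using hu (i + 1) (by simpa using Nat.succ_lt_succ hi)) x]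
    simp

-- scanL passes untouched over a block u in which no pattern of S can match
theorem scanL_append (S : List (List Char)) :
    ∀ (u : List Char), (∀ q ∈ S, ∀ i < u.length, ¬ q <+: u.drop i ∧ ¬ u.drop i <+: q) →
      ∀ x, scanL S (u ++ x) = u ++ scanL S x := by
  intro u
  induction u with
  | nil => intro _ x; simp
  | cons b u' ih =>
    intro hu x
    have hf : S.find? (fun p => p.isPrefixOf (b :: (u' ++ x))) = none := by
      rw [List.find?_eq_none]
      intro q hq hc
      have h0 := hu q hq 0 (by simp)
      rcases prefix_append_cases (u := b :: u') (x := x)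
          (List.isPrefixOf_iff_prefix.mp hc) with h | h
      · exact h0.1 (by simpa using h)
      · exact h0.2 (by simpa using h)
    rw [show (b :: u') ++ x = b :: (u' ++ x) from rfl,
        scanL_cons_neg S b (u' ++ x) hf,
        ih (fun q hq i hi => by simpa using hu q hq (i + 1) (by simpa using Nat.succ_lt_succ hi)) x]
    simp

-- the heart: replacing p (by p ++ ".") in the output of a scan for S is a scan for S ++ [p],
-- provided p and the members of S cannot overlap each other and contain no dot
theorem step_lemma (p : List Char) (S : List (List Char))
    (hp : p ≠ []) (hdot : '.' ∉ p)
    (hS : ∀ q ∈ S, q ≠ [])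
    (hC1 : ∀ q ∈ S, ∀ i < q.length + 1, ¬ p <+: (q ++ ['.']).drop i ∧ ¬ (q ++ ['.']).drop i <+: p)
    (hC2 : ∀ q ∈ S, ∀ i < p.length, ¬ q <+: p.drop i ∧ ¬ p.drop i <+: q) :
    ∀ l, repl p (p ++ ['.']) (scanL S l) = scanL (S ++ [p]) l := by
  have main : ∀ (n : Nat) (l : List Char), l.length ≤ n →
      repl p (p ++ ['.']) (scanL S l) = scanL (S ++ [p]) l := by
    intro n
    induction n with
    | zero =>
      intro l hl
      have : l = [] := List.eq_nil_of_length_eq_zero (Nat.le_zero.mp hl)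
      subst this
      rw [scanL_nil, scanL_nil, repl_nil]
    | succ n ih =>
      intro l hl
      cases l with
      | nil => rw [scanL_nil, scanL_nil, repl_nil]
      | cons c t =>
        cases hf : S.find? (fun p' => p'.isPrefixOf (c :: t)) with
        | some q =>
          -- a phrase of S matches here: both sides copy q and a dot and go on behind it
          have hqS : q ∈ S := List.mem_of_find?_eq_some hf
          have hq : q ≠ [] := hS q hqS
          have hq1 : 1 ≤ q.length := by
            cases q with
            | nil => exact absurd rfl hq
            | cons a b => simp
          rw [scanL_cons_pos S c t q hf hq]
          have hBlock : ∀ i < (q ++ ['.']).length,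
              ¬ p <+: (q ++ ['.']).drop i ∧ ¬ (q ++ ['.']).drop i <+: p := by
            intro i hi
            exact hC1 q hqS i (by simpa using hi)
          calc repl p (p ++ ['.']) (q ++ '.' :: scanL S ((c :: t).drop q.length))
              = repl p (p ++ ['.']) ((q ++ ['.']) ++ scanL S ((c :: t).drop q.length)) := by simp
            _ = (q ++ ['.']) ++ repl p (p ++ ['.']) (scanL S ((c :: t).drop q.length)) :=
                repl_append p (p ++ ['.']) (q ++ ['.']) hBlock _
            _ = (q ++ ['.']) ++ scanL (S ++ [p]) ((c :: t).drop q.length) := by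
                rw [ih _ (by have hl' : t.length + 1 ≤ n + 1 := by simpa using hl
                             simp; omega)]
            _ = scanL (S ++ [p]) (c :: t) := by
                rw [scanL_cons_pos (S ++ [p]) c t q (find?_append_some _ hf) hq]
                simp
        | none =>
          by_cases hpp : p <+: c :: t
          · -- p (and no phrase of S) matches here
            have hpt : (c :: t) = p ++ (c :: t).drop p.length :=
              (List.prefix_iff_eq_append.mp hpp).symm
            have hfA : (S ++ [p]).find? (fun p' => p'.isPrefixOf (c :: t)) = some p := by
              rw [find?_append_none _ hf]
              simp [List.isPrefixOf_iff_prefix, hpp]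
            rw [scanL_cons_pos (S ++ [p]) c t p hfA hp]
            have hp1 : 1 ≤ p.length := by
              cases p with
              | nil => exact absurd rfl hp
              | cons a b => simp
            have hSut : scanL S (c :: t) = p ++ scanL S ((c :: t).drop p.length) := by
              conv_lhs => rw [hpt]
              exact scanL_append S p (fun q hq i hi => hC2 q hq i hi) _
            rw [hSut]
            have hmatch : p.isPrefixOf (p ++ scanL S ((c :: t).drop p.length)) = true :=
              List.isPrefixOf_iff_prefix.mpr (List.prefix_append _ _)
            have hcons : ∃ c' t', p ++ scanL S ((c :: t).drop p.length) = c' :: t' := by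
              cases p with
              | nil => exact absurd rfl hp
              | cons a b => exact ⟨a, _, rfl⟩
            obtain ⟨c', t', he⟩ := hcons
            rw [he, repl_cons_pos p (p ++ ['.']) c' t' (he ▸ hmatch) hp, ← he, List.drop_left]
            rw [ih _ (by have hl' : t.length + 1 ≤ n + 1 := by simpa using hl
                         simp; omega)]
            simp
          · -- nothing matches here: both sides copy one character
            have hfA : (S ++ [p]).find? (fun p' => p'.isPrefixOf (c :: t)) = none := by
              rw [find?_append_none _ hf]
              simp [List.isPrefixOf_iff_prefix, hpp]
            rw [scanL_cons_neg (S ++ [p]) c t hfA, scanL_cons_neg S c t hf]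
            have hnp : ¬ p.isPrefixOf (c :: scanL S t) = true := by
              intro hc
              have : p <+: c :: t := by
                have h1 : p <+: scanL S (c :: t) := by
                  rw [scanL_cons_neg S c t hf]
                  exact List.isPrefixOf_iff_prefix.mp hc
                exact scan_prefix_dotfree S hS (c :: t).length (c :: t) p (le_refl _) hdot h1
              exact hpp this
            rw [repl_cons_neg p (p ++ ['.']) c (scanL S t) hnp, ih _ (by simpa using hl)]
  intro l
  exact main l.length l (le_refl _)

-- the four phrases, unrolled
theorem chain_eq (l : List Char) :
    repl "the keys".toList "the keys.".toList
      (repl "The risk is access".toList "The risk is access.".toList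
        (repl "A worker".toList "A worker.".toList
          (repl "not human".toList "not human.".toList l))) = scanL pvPhrases l := by
  have h1 := step_lemma "not human".toList [] (by decide) (by decide)
    (by intro q hq; simp at hq) (by intro q hq; simp at hq) (by intro q hq; simp at hq) l
  have h2 := step_lemma "A worker".toList ["not human".toList]
    (by decide) (by decide) (by decide) (by decide) (by decide) l
  have h3 := step_lemma "The risk is access".toList ["not human".toList, "A worker".toList]
    (by decide) (by decide) (by decide) (by decide) (by decide) l
  have h4 := step_lemma "the keys".toList
    ["not human".toList, "A worker".toList, "The risk is access".toList]
    (by decide) (by decide) (by decide) (by decide) (by decide) l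
  rw [scanL_empty] at h1
  rw [show "not human".toList ++ ['.'] = "not human.".toList from rfl] at h1
  rw [show "A worker".toList ++ ['.'] = "A worker.".toList from rfl] at h2
  rw [show "The risk is access".toList ++ ['.'] = "The risk is access.".toList from rfl] at h3
  rw [show "the keys".toList ++ ['.'] = "the keys.".toList from rfl] at h4
  rw [show ([] : List (List Char)) ++ ["not human".toList] = ["not human".toList] from rfl] at h1
  rw [show ["not human".toList] ++ ["A worker".toList] =
      ["not human".toList, "A worker".toList] from rfl] at h2
  rw [show ["not human".toList, "A worker".toList] ++ ["The risk is access".toList] =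
      ["not human".toList, "A worker".toList, "The risk is access".toList] from rfl] at h3
  rw [show ["not human".toList, "A worker".toList, "The risk is access".toList] ++
      ["the keys".toList] = pvPhrases from rfl] at h4
  rw [h1, h2, h3, h4]

-- A, unfolded to the four replace calls
theorem A_unfold (text : String) :
    emphasize_power_phrases_py text =
      PySem.Str.replace
        (PySem.Str.replace
          (PySem.Str.replace
            (PySem.Str.replace text "not human" "not human.")
            "A worker" "A worker.")
          "The risk is access" "The risk is access.")
        "the keys" "the keys." := rfl

-- ===== VERDICT (by name: the statement is the Claim_ definition above) =====
theorem emphasize_power_phrases_py_spec : Claim_equal_emphasize_power_phrases_py := by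
  intro text _
  unfold Spec_emphasize_power_phrases_py emphasize_power_phrases_py_alt
  rw [A_unfold]
  simp only [PySem.Str.replace, String.toList_ofList]
  congr 1
  rw [replace_eq_repl _ _ _ (by decide), replace_eq_repl _ _ _ (by decide),
      replace_eq_repl _ _ _ (by decide), replace_eq_repl _ _ _ (by decide)]
  exact chain_eq text.toList
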